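-- pv_equiv track=rewrite | github.com/amymainyc/calc-calculator | functions/other.py | range2
-- ===== SOURCE A (Python) =====
-- def range2(arr):
--   arr = arr[:-1]
--   arr.sort()
--   mx = arr[0]
--   mn = arr[0]
--   for i in range(len(arr)):
--     mx = max(mx, arr[i])
--     mn = min(mn, arr[i])
--   return mx - mn
-- ===== SOURCE B (Python) =====
-- def range2(arr):
--   s = sorted(arr[:-1])
--   return s[-1] - s[0]
-- ===== Notes on version B (the rewrite author's own statement) =====
-- stated objective: simpler
-- what changed: B sorts the prefix once and reads the range directly off the sorted endpoints s[-1]-s[0], removing A's running min/max index loop over every element.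
import Mathlib
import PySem

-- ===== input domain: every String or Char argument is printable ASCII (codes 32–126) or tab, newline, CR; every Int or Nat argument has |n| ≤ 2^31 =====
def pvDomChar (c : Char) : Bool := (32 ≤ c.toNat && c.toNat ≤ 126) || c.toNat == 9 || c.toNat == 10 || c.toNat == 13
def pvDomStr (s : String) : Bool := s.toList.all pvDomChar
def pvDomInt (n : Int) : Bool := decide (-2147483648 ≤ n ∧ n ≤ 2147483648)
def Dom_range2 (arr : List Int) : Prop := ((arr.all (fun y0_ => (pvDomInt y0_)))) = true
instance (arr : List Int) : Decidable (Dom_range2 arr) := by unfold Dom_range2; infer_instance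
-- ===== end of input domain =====

-- B simplifies A: sort the prefix once and read the range off the sorted endpoints
-- instead of scanning every element with a running min/max loop.

-- ===== PORT A =====
def range2 (arr : List Int) : Int :=
  -- arr = arr[:-1]; arr.sort()
  let a := PySem.List.sorted (PySem.List.slice arr none (some (-1))) (fun x => x) false
  -- mx = arr[0]; mn = arr[0]   (IndexError on an empty list is excluded by Pre_)
  let mx0 := PySem.List.pyGetD a 0 0
  let mn0 := PySem.List.pyGetD a 0 0
  -- for i in range(len(arr)): mx = max(mx, arr[i]); mn = min(mn, arr[i])
  let p := (PySem.List.pyRange 0 (a.length : Int) 1).foldl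
      (fun (p : Int × Int) i =>
        (max p.1 (PySem.List.pyGetD a i 0), min p.2 (PySem.List.pyGetD a i 0)))
      (mx0, mn0)
  p.1 - p.2

-- ===== PORT B =====
def range2_alt (arr : List Int) : Int :=
  -- s = sorted(arr[:-1]); return s[-1] - s[0]
  let s := PySem.List.sorted (PySem.List.slice arr none (some (-1))) (fun x => x) false
  PySem.List.pyGetD s (-1) 0 - PySem.List.pyGetD s 0 0

-- ===== PRECONDITION & SPEC =====
-- Both programs index into sorted(arr[:-1]); on lists of length ≤ 1 that list is empty and
-- A raises IndexError, so such inputs are excluded.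
def Pre_range2 (arr : List Int) : Prop := 2 ≤ arr.length
instance (arr : List Int) : Decidable (Pre_range2 arr) := by unfold Pre_range2; infer_instance
def pvWitness_range2 : List Int := [3, 1, 7]

def Spec_range2 (arr : List Int) (out : Int) : Prop := out = range2_alt arr
instance (arr : List Int) (out : Int) : Decidable (Spec_range2 arr out) := by unfold Spec_range2; infer_instance

-- ===== CLAIM (what is proved, stated in full; the proofs are below) =====
def Claim_equal_range2 : Prop := ∀ (arr : List Int), Dom_range2 arr → Pre_range2 arr → Spec_range2 arr (range2 arr)

-- ===== LEMMAS AND PROOFS =====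

-- On a ≤-sorted nonempty list, the running max from the head is the last element.
theorem foldl_max_eq_getLast (h : Int) (t : List Int)
    (hp : (h :: t).Pairwise (· ≤ ·)) :
    t.foldl max h = (h :: t).getLast (by simp) := by
  induction t generalizing h with
  | nil => simp
  | cons x xs ih =>
    have hx : h ≤ x := (List.pairwise_cons.mp hp).1 x (by simp)
    have hp' : (x :: xs).Pairwise (· ≤ ·) := (List.pairwise_cons.mp hp).2
    simp only [List.foldl_cons]
    rw [max_eq_right hx]
    have := ih x hp'
    simpa [List.getLast] using this

-- On a ≤-sorted list, the running min from the head stays the head.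
theorem foldl_min_eq_head (h : Int) (t : List Int)
    (hp : (h :: t).Pairwise (· ≤ ·)) :
    t.foldl min h = h := by
  induction t generalizing h with
  | nil => simp
  | cons x xs ih =>
    have hx : h ≤ x := (List.pairwise_cons.mp hp).1 x (by simp)
    have hp' : (h :: xs).Pairwise (· ≤ ·) := by
      rcases List.pairwise_cons.mp hp with ⟨h1, h2⟩
      exact List.pairwise_cons.mpr ⟨fun y hy => h1 y (by simp [hy]),
        (List.pairwise_cons.mp h2).2⟩
    simp only [List.foldl_cons]
    rw [min_eq_left hx]
    exact ih h hp'

-- ===== VERDICT (by name: the statement is the Claim_ definition above) =====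
theorem range2_spec : Claim_equal_range2 := by
  intro arr _ hpre
  unfold Pre_range2 at hpre
  unfold Spec_range2 range2 range2_alt
  simp only []
  set a := PySem.List.sorted (PySem.List.slice arr none (some (-1))) (fun x => x) false with ha
  have hlen : a.length = arr.length - 1 := by
    rw [ha, PySem.List.length_sorted, PySem.List.slice_to_neg_one, List.length_dropLast]
  have hne : a ≠ [] := by
    intro h; rw [h] at hlen; simp at hlen; omega
  have hp : a.Pairwise (· ≤ ·) := by
    simpa using PySem.List.sorted_pairwise (PySem.List.slice arr none (some (-1))) (fun x => x)
  clear_value a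
  obtain ⟨h, t, hht⟩ := List.exists_cons_of_ne_nil hne
  rw [PySem.List.foldl_pyRange_zero_pyGetD' a 0
      (fun (p : Int × Int) x => (max p.1 x, min p.2 x)) _]
  rw [PySem.List.foldl_prod_mk (f := fun s e => max s e) (g := fun s e => min s e)]
  rw [PySem.List.pyGetD_neg_one a 0 hne]
  subst hht
  rw [List.pairwise_cons] at hp
  simp only [PySem.List.pyGetD_zero_cons, List.foldl_cons, max_self, min_self]
  rw [foldl_max_eq_getLast h t (List.pairwise_cons.mpr hp),
      foldl_min_eq_head h t (List.pairwise_cons.mpr hp)]
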